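-- pv_equiv track=rewrite | github.com/Big-E-Green/Electron-phonon_GF_Feynman_Diagrams | el_ph_gen_functions.py | pair_gen_ph
-- ===== SOURCE A (Python) =====
-- def pair_gen_ph(n):                     # generates pairs e.g. 11,1p for the given n
--     One=[]
--     c=2
--     while n>=c:
--         g=str(c)+str(c)
--         f=str(c)+'p'
--         One.extend([str(g),str(f)])
--         c+=1
--     chunked=[]
--     for x in range(0, len(One), 2):
--         chunked.append(One[x:x+2])
--     return chunked
-- ===== SOURCE B (Python) =====
-- def pair_gen_ph(n):
--     return [[str(c) + str(c), str(c) + 'p'] for c in range(2, n + 1)]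
-- ===== Notes on version B (the rewrite author's own statement) =====
-- stated objective: simpler
-- what changed: B builds each two-element pair directly in a single comprehension over range(2, n+1), eliminating A's while-loop that builds a flat list followed by a second re-chunking pass with slices.
import Mathlib
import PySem

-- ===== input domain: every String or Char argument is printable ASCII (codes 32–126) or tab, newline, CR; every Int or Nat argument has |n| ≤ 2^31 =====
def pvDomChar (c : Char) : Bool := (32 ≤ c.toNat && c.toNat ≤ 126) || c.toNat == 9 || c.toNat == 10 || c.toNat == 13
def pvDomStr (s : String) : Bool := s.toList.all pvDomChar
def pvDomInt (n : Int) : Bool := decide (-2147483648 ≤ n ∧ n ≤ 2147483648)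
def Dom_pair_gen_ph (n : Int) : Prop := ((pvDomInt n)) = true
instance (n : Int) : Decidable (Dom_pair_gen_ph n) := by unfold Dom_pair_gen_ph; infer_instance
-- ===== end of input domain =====

-- B builds each ['cc','cp'] pair directly in one comprehension over range(2, n+1),
-- replacing A's while-loop building a flat list followed by a second re-chunking pass; objective: simpler.

-- ===== PORT A =====
-- the while loop 'while n >= c: ... c += 1' accumulating the flat list One
def pairGenPhLoop (n c : Int) (One : List String) : List String :=
  if n ≥ c then
    pairGenPhLoop n (c + 1)
      (One ++ [PySem.Int.toStr c ++ PySem.Int.toStr c, PySem.Int.toStr c ++ "p"])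
  else One
termination_by (n + 1 - c).toNat
decreasing_by omega

def pair_gen_ph (n : Int) : List (List String) :=
  let One := pairGenPhLoop n 2 []
  (PySem.List.pyRange 0 (One.length : Int) 2).foldl
    (fun chunked x => chunked ++ [PySem.List.slice One (some x) (some (x + 2))]) []

-- ===== PORT B =====
def pair_gen_ph_alt (n : Int) : List (List String) :=
  (PySem.List.pyRange 2 (n + 1) 1).map
    (fun c => [PySem.Int.toStr c ++ PySem.Int.toStr c, PySem.Int.toStr c ++ "p"])

-- ===== PRECONDITION & SPEC =====
def Spec_pair_gen_ph (n : Int) (out : List (List String)) : Prop := out = pair_gen_ph_alt n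
instance (n : Int) (out : List (List String)) : Decidable (Spec_pair_gen_ph n out) := by unfold Spec_pair_gen_ph; infer_instance

-- ===== CLAIM (what is proved, stated in full; the proofs are below) =====
def Claim_equal_pair_gen_ph : Prop := ∀ (n : Int), Dom_pair_gen_ph n → Spec_pair_gen_ph n (pair_gen_ph n)

-- ===== LEMMAS AND PROOFS =====

-- A's flat list One is the flatten of B's list of pairs
theorem pairGenPhLoop_eq (n : Int) : ∀ (k : Nat) (c : Int) (One : List String),
    (n + 1 - c).toNat = k →
    pairGenPhLoop n c One = One ++ ((PySem.List.pyRange c (n + 1) 1).map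
      (fun c => [PySem.Int.toStr c ++ PySem.Int.toStr c, PySem.Int.toStr c ++ "p"])).flatten := by
  intro k
  induction k with
  | zero =>
    intro c One hk
    rw [pairGenPhLoop, if_neg (by omega), PySem.List.pyRange_one_eq_nil (by omega)]
    simp
  | succ k ih =>
    intro c One hk
    rw [pairGenPhLoop, if_pos (by omega), ih (c + 1) _ (by omega),
      PySem.List.pyRange_one_cons (by omega : c < n + 1)]
    simp

-- the k-th two-element slice of a flatten of 2-element lists is the k-th list
theorem take_drop_flatten (L : List (List String)) (h : ∀ l ∈ L, l.length = 2) :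
    ∀ (k : Nat), k < L.length → (L.flatten.drop (2 * k)).take 2 = L[k]! := by
  induction L with
  | nil => intro k hk; simp at hk
  | cons a t ih =>
    intro k hk
    have ha : a.length = 2 := h a (by simp)
    cases k with
    | zero => simpa using List.take_left' ha
    | succ k =>
      have : (a ++ t.flatten).drop (2 * (k + 1)) = t.flatten.drop (2 * k) := by
        rw [show 2*(k+1) = a.length + 2*k by omega]
        exact List.drop_length_add_append (2 * k)
      simp only [List.flatten_cons, this]
      rw [ih (fun l hl => h l (by simp [hl])) k (by simpa using hk)]
      simp

theorem len_flatten (L : List (List String)) (h : ∀ l ∈ L, l.length = 2) :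
    L.flatten.length = 2 * L.length := by
  induction L with
  | nil => simp
  | cons a t ih =>
    have := h a (by simp)
    simp [ih (fun l hl => h l (by simp [hl])), this]; omega

-- the chunking pass over a flatten of 2-element lists returns the original nested list
theorem chunk_flatten (L : List (List String)) (h : ∀ l ∈ L, l.length = 2) :
    (PySem.List.pyRange 0 (L.flatten.length : Int) 2).foldl
      (fun chunked x => chunked ++ [PySem.List.slice L.flatten (some x) (some (x + 2))]) []
    = L := by
  rw [PySem.List.pyRange_of_pos _ _ (by omega),
      PySem.List.foldl_append_singleton_eq_map, List.nil_append]
  rw [len_flatten L h]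
  have hif : (if (0:Int) < (2 * L.length : Nat) then ((((2 * L.length : Nat) : Int) - 0 + 2 - 1) / 2).toNat else 0) = L.length := by
    split <;> push_cast <;> omega
  rw [hif, List.map_map]
  apply List.ext_getElem (by simp)
  intro k hk hk'
  simp only [List.getElem_map, List.getElem_range, Function.comp]
  have e1 : (0 : Int) + 2 * (k : Int) = ((2 * k : Nat) : Int) := by push_cast; ring
  have e2 : ((2 * k : Nat) : Int) + 2 = ((2 * k + 2 : Nat) : Int) := by push_cast; ring
  rw [e1, e2, PySem.List.slice_natCast]
  have := take_drop_flatten L h k (by simpa using hk')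
  simp only [show 2 * k + 2 - 2 * k = 2 by omega] at *
  rw [this, List.getElem!_eq_getElem?_getD, List.getElem?_eq_getElem (by simpa using hk')]
  rfl

-- ===== VERDICT (by name: the statement is the Claim_ definition above) =====
theorem pair_gen_ph_spec : Claim_equal_pair_gen_ph := by
  intro n _
  unfold Spec_pair_gen_ph pair_gen_ph
  rw [pairGenPhLoop_eq n _ 2 [] rfl, List.nil_append]
  exact chunk_flatten (pair_gen_ph_alt n)
    (by intro l hl; simp only [pair_gen_ph_alt, List.mem_map] at hl
        obtain ⟨c, -, rfl⟩ := hl; rfl)
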